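-- pv_equiv track=rewrite | github.com/kacperski36/MinWiedzy | lab4/lab4.py | kNajmniejszych
-- ===== SOURCE A (Python) =====
-- def kNajmniejszych(k, slownik):
--     wynik = dict()
--     for key in slownik:
--         sortedDict = sorted(slownik[key])
--         sortedDict = sortedDict[:k]
--         wynikSum = sum(sortedDict)
--         wynik[key] = wynikSum
--     return wynik
-- ===== SOURCE B (Python) =====
-- def kNajmniejszych(k, slownik):
--     def sumSmallest(m, vals):
--         # sum of the m smallest elements of vals, by quickselect-style partitioning
--         if m <= 0:
--             return 0
--         if m >= len(vals):
--             return sum(vals)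
--         p = vals[len(vals) // 2]
--         lo = [x for x in vals if x < p]
--         hi = [x for x in vals if x > p]
--         neq = len(vals) - len(lo) - len(hi)
--         if m <= len(lo):
--             return sumSmallest(m, lo)
--         if m <= len(lo) + neq:
--             return sum(lo) + (m - len(lo)) * p
--         return sum(lo) + neq * p + sumSmallest(m - len(lo) - neq, hi)
--     out = {}
--     for key, vals in slownik.items():
--         m = k if k >= 0 else len(vals) + k  # first-k-of-sorted slice semantics
--         out[key] = sumSmallest(m, vals)
--     return out
-- ===== Notes on version B (the rewrite author's own statement) =====
-- stated objective: alternative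
-- what changed: per key, the sort-slice-sum is replaced by a quickselect-style three-way-partition recursion that sums the m smallest values without ever sorting (negative k is normalised to len+k as the slice does)
import Mathlib
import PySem

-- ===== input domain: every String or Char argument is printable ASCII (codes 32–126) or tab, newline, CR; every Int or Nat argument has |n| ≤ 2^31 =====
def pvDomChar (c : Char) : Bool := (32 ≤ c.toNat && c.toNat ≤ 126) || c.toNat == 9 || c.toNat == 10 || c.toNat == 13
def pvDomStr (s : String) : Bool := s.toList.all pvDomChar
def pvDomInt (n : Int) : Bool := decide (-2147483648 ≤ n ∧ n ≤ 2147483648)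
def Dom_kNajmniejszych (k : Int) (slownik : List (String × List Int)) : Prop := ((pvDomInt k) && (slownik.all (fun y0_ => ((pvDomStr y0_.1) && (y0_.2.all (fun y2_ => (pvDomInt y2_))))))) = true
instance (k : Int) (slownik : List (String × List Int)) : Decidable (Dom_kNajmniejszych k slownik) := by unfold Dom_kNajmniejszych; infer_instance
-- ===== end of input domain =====

-- B replaces A's per-key sort+slice+sum by a quickselect-style three-way partition recursion
-- that sums the m smallest values without sorting (objective: alternative algorithm).

-- ===== PORT A =====
-- slownik[key] : dict lookup (first match; under Pre_ keys are distinct so this is exact)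
def pvLookup (slownik : List (String × List Int)) (key : String) : List Int :=
  ((slownik.find? (fun kv => kv.1 == key)).map Prod.snd).getD []

def kNajmniejszych (k : Int) (slownik : List (String × List Int)) : List (String × Int) :=
  ((slownik.map Prod.fst).foldl (fun wynik key =>
      let sortedDict := PySem.List.sorted (pvLookup slownik key) (fun x => x) false
      let sortedDict := PySem.List.slice sortedDict none (some k)
      let wynikSum := sortedDict.sum
      PySem.Dict.insert wynik key wynikSum) PySem.Dict.empty).items

-- ===== PORT B =====
def pvSumSmallest (m : Int) (vals : List Int) : Int :=
  if m ≤ 0 then 0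
  else if (vals.length : Int) ≤ m then vals.sum
  else
    let p := vals.getD (vals.length / 2) 0
    let lo := vals.filter (fun x => x < p)
    let hi := vals.filter (fun x => p < x)
    let neq : Int := (vals.length : Int) - lo.length - hi.length
    if m ≤ (lo.length : Int) then pvSumSmallest m lo
    else if m ≤ (lo.length : Int) + neq then lo.sum + (m - lo.length) * p
    else lo.sum + neq * p + pvSumSmallest (m - lo.length - neq) hi
termination_by vals.length
decreasing_by
  · have hp : vals.getD (vals.length / 2) 0 ∈ vals := by
      rw [List.getD_eq_getElem _ _ (by omega)]
      exact List.getElem_mem _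
    have hlt : (List.filter (fun (x : {x // x ∈ vals}) => decide (x.1 < vals.getD (vals.length / 2) 0)) vals.attach).length < vals.attach.length :=
      by rw [List.length_filter_lt_length_iff_exists]
         exact ⟨⟨_, hp⟩, List.mem_attach _ _, by simp⟩
    simpa using hlt
  · have hp : vals.getD (vals.length / 2) 0 ∈ vals := by
      rw [List.getD_eq_getElem _ _ (by omega)]
      exact List.getElem_mem _
    have hlt : (List.filter (fun (x : {x // x ∈ vals}) => decide (vals.getD (vals.length / 2) 0 < x.1)) vals.attach).length < vals.attach.length :=
      by rw [List.length_filter_lt_length_iff_exists]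
         exact ⟨⟨_, hp⟩, List.mem_attach _ _, by simp⟩
    simpa using hlt

def kNajmniejszych_alt (k : Int) (slownik : List (String × List Int)) : List (String × Int) :=
  (slownik.foldl (fun out kv =>
      let m := if 0 ≤ k then k else (kv.2.length : Int) + k
      PySem.Dict.insert out kv.1 (pvSumSmallest m kv.2)) PySem.Dict.empty).items

-- ===== PRECONDITION & SPEC =====
-- Pre_ excludes association lists with duplicate keys: the Python argument is a dict, which
-- collapses duplicates last-wins, so such lists have no faithful dict counterpart (a
-- defensible-corner representation ambiguity, not a behaviour of A).
def Pre_kNajmniejszych (k : Int) (slownik : List (String × List Int)) : Prop :=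
  (slownik.map Prod.fst).Nodup
instance (k : Int) (slownik : List (String × List Int)) : Decidable (Pre_kNajmniejszych k slownik) := by unfold Pre_kNajmniejszych; infer_instance

def pvWitness_kNajmniejszych : Int × (List (String × List Int)) :=
  (2, [("a", [3, 1, 2]), ("b", [])])

def Spec_kNajmniejszych (k : Int) (slownik : List (String × List Int)) (out : List (String × Int)) : Prop := out = kNajmniejszych_alt k slownik
instance (k : Int) (slownik : List (String × List Int)) (out : List (String × Int)) : Decidable (Spec_kNajmniejszych k slownik out) := by unfold Spec_kNajmniejszych; infer_instance

-- ===== CLAIM (what is proved, stated in full; the proofs are below) =====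
def Claim_equal_kNajmniejszych : Prop := ∀ (k : Int) (slownik : List (String × List Int)), Dom_kNajmniejszych k slownik → Pre_kNajmniejszych k slownik → Spec_kNajmniejszych k slownik (kNajmniejszych k slownik)

-- ===== LEMMAS AND PROOFS =====

theorem pvTri (p : Int) (l : List Int) :
    (l.filter (fun x => x < p)).length + l.count p + (l.filter (fun x => p < x)).length = l.length := by
  induction l with
  | nil => simp
  | cons a t ih =>
    rcases lt_trichotomy a p with h | h | h
    · simp [h, h.ne, not_lt_of_gt h]; omega
    · subst h; simp; omega
    · simp [h, h.ne', not_lt_of_gt h]; omega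

theorem pvSortedDecomp (p : Int) (vals : List Int) :
    PySem.List.sorted vals (fun x => x) false
      = PySem.List.sorted (vals.filter (fun x => x < p)) (fun x => x) false
        ++ List.replicate (vals.count p) p
        ++ PySem.List.sorted (vals.filter (fun x => p < x)) (fun x => x) false := by
  rw [List.append_assoc]
  have e2 : (vals.filter (fun x => !decide (x < p))).filter (fun x => x == p) = List.replicate (vals.count p) p := by
    rw [List.filter_filter]
    have h : vals.filter (fun a => a == p && !decide (a < p)) = vals.filter (fun a => a == p) := by
      apply List.filter_congr
      intro a _
      by_cases h : a = p <;> simp [h]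
    rw [h, List.filter_beq]
  have e3 : (vals.filter (fun x => !decide (x < p))).filter (fun x => !(x == p)) = vals.filter (fun x => p < x) := by
    rw [List.filter_filter]
    apply List.filter_congr
    intro a _
    rcases lt_trichotomy a p with h | h | h
    · simp [h, not_lt_of_gt h]
    · subst h; simp
    · simp [h, not_lt_of_gt h, h.ne']
  apply PySem.List.sorted_id_eq_of_perm_of_pairwise
  · -- permutation
    have h1 := List.filter_append_perm (fun x => decide (x < p)) vals
    have h2 := List.filter_append_perm (fun x => x == p) (vals.filter (fun x => !decide (x < p)))
    rw [e2, e3] at h2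
    exact ((PySem.List.sorted_perm _ _ _).append
      ((List.Perm.append_left _ (PySem.List.sorted_perm _ _ _)).trans h2)).trans h1
  · -- pairwise ≤
    have memA : ∀ a ∈ PySem.List.sorted (vals.filter (fun x => x < p)) (fun x => x) false, a < p := by
      intro a ha
      have := (PySem.List.mem_sorted _ _ _ _).mp ha
      simpa using (List.mem_filter.mp this).2
    have memC : ∀ c ∈ PySem.List.sorted (vals.filter (fun x => p < x)) (fun x => x) false, p < c := by
      intro c hc
      have := (PySem.List.mem_sorted _ _ _ _).mp hc
      simpa using (List.mem_filter.mp this).2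
    rw [List.pairwise_append, List.pairwise_append]
    refine ⟨PySem.List.sorted_pairwise _ _, ⟨List.pairwise_replicate.mpr (Or.inr le_rfl), PySem.List.sorted_pairwise _ _, ?_⟩, ?_⟩
    · intro b hb c hc
      rw [List.eq_of_mem_replicate hb]
      exact (memC c hc).le
    · intro a ha x hx
      rcases List.mem_append.mp hx with hx | hx
      · rw [List.eq_of_mem_replicate hx]
        exact (memA a ha).le
      · exact ((memA a ha).trans (memC x hx)).le

theorem pvSumSmallest_eq (m : Int) (vals : List Int) :
    pvSumSmallest m vals = ((PySem.List.sorted vals (fun x => x) false).take m.toNat).sum := by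
  induction m, vals using pvSumSmallest.induct with
  | case1 m vals h =>
    rw [pvSumSmallest.eq_def]
    have : m.toNat = 0 := by omega
    simp [h, this]
  | case2 m vals h1 h2 =>
    rw [pvSumSmallest.eq_def]
    have hlen : (PySem.List.sorted vals (fun x => x) false).length ≤ m.toNat := by
      rw [PySem.List.length_sorted]; omega
    rw [List.take_of_length_le hlen]
    simp only [if_neg h1, if_pos h2]
    exact ((PySem.List.sorted_perm vals _ false).sum_eq).symm
  | case3 m vals h1 h2 p lo h3 ih =>
    have hlo : lo = vals.filter (fun x => decide (x < p)) := by
      simp only [lo, List.unattach_filter, List.unattach_attach]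
    rw [hlo] at h3 ih
    rw [pvSumSmallest.eq_def]
    simp only [if_neg h1, if_neg h2]
    rw [if_pos h3, ih, pvSortedDecomp p vals]
    have hA : (PySem.List.sorted (vals.filter (fun x => decide (x < p))) (fun x => x) false).length
        = (vals.filter (fun x => decide (x < p))).length := PySem.List.length_sorted _ _ _
    rw [List.take_append, List.take_append]
    have hn : m.toNat ≤ (vals.filter (fun x => decide (x < p))).length := by omega
    have hz : m.toNat - ((vals.filter (fun x => decide (x < p))).length + List.count p vals) = 0 := by omega
    simp [hA, hn, Nat.sub_eq_zero_of_le, hz]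
  | case4 m vals h1 h2 p lo hi neq h4 h5 =>
    have hlo : lo = vals.filter (fun x => decide (x < p)) := by
      simp only [lo, List.unattach_filter, List.unattach_attach]
    have hhi : hi = vals.filter (fun x => decide (p < x)) := by
      simp only [hi, List.unattach_filter, List.unattach_attach]
    have e1 : lo.length = (vals.filter (fun x => decide (x < p))).length := by rw [hlo]
    have e2 : hi.length = (vals.filter (fun x => decide (p < x))).length := by rw [hhi]
    have en : neq = (vals.length : Int) - lo.length - hi.length := rfl
    have t := pvTri p vals
    rw [pvSumSmallest.eq_def]
    simp only [if_neg h1, if_neg h2]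
    rw [if_neg (show ¬ m ≤ ((vals.filter (fun x => decide (x < p))).length : Int) by omega)]
    rw [if_pos (show m ≤ ((vals.filter (fun x => decide (x < p))).length : Int) + ((vals.length : Int) - (vals.filter (fun x => decide (x < p))).length - (vals.filter (fun x => decide (p < x))).length) by omega)]
    rw [pvSortedDecomp p vals, List.take_append, List.take_append]
    have hA : (PySem.List.sorted (vals.filter (fun x => decide (x < p))) (fun x => x) false).length
        = (vals.filter (fun x => decide (x < p))).length := PySem.List.length_sorted _ _ _
    have hz : m.toNat - ((vals.filter (fun x => decide (x < p))).length + List.count p vals) = 0 := by omega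
    have hge : (PySem.List.sorted (vals.filter (fun x => decide (x < p))) (fun x => x) false).length ≤ m.toNat := by omega
    rw [List.take_of_length_le hge, List.take_replicate]
    have hmin : min (m.toNat - (PySem.List.sorted (vals.filter (fun x => decide (x < p))) (fun x => x) false).length) (List.count p vals)
        = m.toNat - (vals.filter (fun x => decide (x < p))).length := by omega
    rw [hmin]
    simp only [List.length_append, hA, List.length_replicate, hz, List.take_zero,
      List.sum_append, List.sum_nil, List.sum_replicate, add_zero]
    rw [(PySem.List.sorted_perm (vals.filter (fun x => decide (x < p))) _ false).sum_eq]
    have hc : ((m.toNat - (vals.filter (fun x => decide (x < p))).length : ℕ) : ℤ)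
        = m - ((vals.filter (fun x => decide (x < p))).length : ℤ) := by omega
    rw [nsmul_eq_mul, hc]
  | case5 m vals h1 h2 p lo hi neq h4 h5 ih =>
    have hlo : lo = vals.filter (fun x => decide (x < p)) := by
      simp only [lo, List.unattach_filter, List.unattach_attach]
    have hhi : hi = vals.filter (fun x => decide (p < x)) := by
      simp only [hi, List.unattach_filter, List.unattach_attach]
    have e1 : lo.length = (vals.filter (fun x => decide (x < p))).length := by rw [hlo]
    have e2 : hi.length = (vals.filter (fun x => decide (p < x))).length := by rw [hhi]
    have en : neq = (vals.length : Int) - lo.length - hi.length := rfl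
    have t := pvTri p vals
    rw [hhi] at ih
    rw [pvSumSmallest.eq_def]
    simp only [if_neg h1, if_neg h2]
    rw [if_neg (show ¬ m ≤ ((vals.filter (fun x => decide (x < p))).length : Int) by omega)]
    rw [if_neg (show ¬ m ≤ ((vals.filter (fun x => decide (x < p))).length : Int) + ((vals.length : Int) - (vals.filter (fun x => decide (x < p))).length - (vals.filter (fun x => decide (p < x))).length) by omega)]
    show (vals.filter (fun x => decide (x < p))).sum
        + ((vals.length : Int) - (vals.filter (fun x => decide (x < p))).length - (vals.filter (fun x => decide (p < x))).length) * p
        + pvSumSmallest (m - ((vals.filter (fun x => decide (x < p))).length : Int) - ((vals.length : Int) - (vals.filter (fun x => decide (x < p))).length - (vals.filter (fun x => decide (p < x))).length)) (vals.filter (fun x => decide (p < x)))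
      = (List.take m.toNat (PySem.List.sorted vals (fun x => x) false)).sum
    have harg : m - ((lo.length : Int)) - neq = m - ((vals.filter (fun x => decide (x < p))).length : Int) - ((vals.length : Int) - (vals.filter (fun x => decide (x < p))).length - (vals.filter (fun x => decide (p < x))).length) := by omega
    rw [← harg, ih, pvSortedDecomp p vals, List.take_append, List.take_append]
    have hA : (PySem.List.sorted (vals.filter (fun x => decide (x < p))) (fun x => x) false).length
        = (vals.filter (fun x => decide (x < p))).length := PySem.List.length_sorted _ _ _
    have hge : (PySem.List.sorted (vals.filter (fun x => decide (x < p))) (fun x => x) false).length ≤ m.toNat := by omega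
    rw [List.take_of_length_le hge, List.take_replicate]
    have hmin : min (m.toNat - (PySem.List.sorted (vals.filter (fun x => decide (x < p))) (fun x => x) false).length) (List.count p vals)
        = List.count p vals := by omega
    rw [hmin]
    simp only [List.length_append, hA, List.length_replicate, List.sum_append, List.sum_replicate]
    rw [(PySem.List.sorted_perm (vals.filter (fun x => decide (x < p))) _ false).sum_eq]
    have hc2 : (m - ((lo.length : Int)) - neq).toNat = m.toNat - ((vals.filter (fun x => decide (x < p))).length + List.count p vals) := by omega
    rw [hc2]
    have hneq : ((vals.length : Int) - (vals.filter (fun x => decide (x < p))).length - (vals.filter (fun x => decide (p < x))).length) = (List.count p vals : Int) := by omega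
    rw [hneq, nsmul_eq_mul]

theorem pvPerKey (k : Int) (vals : List Int) :
    (PySem.List.slice (PySem.List.sorted vals (fun x => x) false) none (some k)).sum
      = pvSumSmallest (if 0 ≤ k then k else (vals.length : Int) + k) vals := by
  by_cases hk : 0 ≤ k
  · rw [if_pos hk, PySem.List.slice_to _ hk, pvSumSmallest_eq]
  · rw [if_neg hk, pvSumSmallest_eq]
    have hj : k = -((k.natAbs : Nat) : Int) := by omega
    rw [hj, PySem.List.slice_to_neg_natCast _ k.natAbs (by omega), PySem.List.length_sorted]
    have : vals.length - k.natAbs = ((vals.length : Int) + k).toNat := by omega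
    rw [this, ← hj]

theorem pvLookup_eq (slownik : List (String × List Int))
    (h : (slownik.map Prod.fst).Nodup) :
    ∀ kv ∈ slownik, pvLookup slownik kv.1 = kv.2 := by
  induction slownik with
  | nil => intro kv hkv; cases hkv
  | cons hd tl ih =>
    rw [List.map_cons, List.nodup_cons] at h
    intro kv hkv
    rcases List.mem_cons.mp hkv with rfl | hkv
    · simp [pvLookup]
    · have hne : (hd.1 == kv.1) = false := by
        simp only [beq_eq_false_iff_ne, ne_eq]
        intro he
        exact h.1 (he ▸ List.mem_map_of_mem hkv)
      simpa [pvLookup, List.find?_cons, hne] using ih h.2 kv hkv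

-- ===== VERDICT (by name: the statement is the Claim_ definition above) =====
theorem kNajmniejszych_spec : Claim_equal_kNajmniejszych := by
  intro k slownik _ hpre
  unfold Spec_kNajmniejszych kNajmniejszych kNajmniejszych_alt
  rw [List.foldl_map]
  congr 1
  apply PySem.List.foldl_congr_mem
  intro acc kv hmem
  simp only
  rw [pvLookup_eq slownik hpre kv hmem, pvPerKey]
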